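-- pv_equiv track=rewrite | github.com/eMetaboHUB/FragHub | scripts/de_novo_calculation.py | generate_hill_formula_string
-- ===== SOURCE A (Python) =====
-- def generate_hill_formula_string(composition):
--     """
--     Generates a Hill system formatted chemical formula string from a composition dict.
--     Example: {'C': 6, 'H': 12, 'O': 6} -> "C6H12O6"
--     """
--     if not composition:
--         return ""
--
--     formula_str = ""
--     # Create a copy without zero-count elements
--     comp = {k: v for k, v in composition.items() if v > 0}
--
--     # Handle C and H first as per Hill system convention
--     if 'C' in comp:
--         count = comp.pop('C')
--         formula_str += f"C{count if count > 1 else ''}"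
--     if 'H' in comp:
--         count = comp.pop('H')
--         formula_str += f"H{count if count > 1 else ''}"
--
--     # Append the rest of the elements sorted alphabetically
--     for element in sorted(comp.keys()):
--         count = comp[element]
--         formula_str += f"{element}{count if count > 1 else ''}"
--
--     return formula_str
-- ===== SOURCE B (Python) =====
-- def generate_hill_formula_string(composition):
--     def hill_key(item):
--         element = item[0]
--         if element == 'C':
--             return '0'
--         if element == 'H':
--             return '1'
--         return '2' + element
--
--     positive = [item for item in composition.items() if item[1] > 0]
--     return ''.join(f"{el}{n if n > 1 else ''}"
--                    for el, n in sorted(positive, key=hill_key))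
-- ===== Notes on version B (the rewrite author's own statement) =====
-- stated objective: simpler
-- what changed: Replaces A's special-case C/H pops from a working dict plus a separate alphabetically-sorted loop by one pass: filter the positive entries, sort them once under a Hill-order key ('0' for C, '1' for H, '2'+element otherwise), and join the rendered pieces.
import Mathlib
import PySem

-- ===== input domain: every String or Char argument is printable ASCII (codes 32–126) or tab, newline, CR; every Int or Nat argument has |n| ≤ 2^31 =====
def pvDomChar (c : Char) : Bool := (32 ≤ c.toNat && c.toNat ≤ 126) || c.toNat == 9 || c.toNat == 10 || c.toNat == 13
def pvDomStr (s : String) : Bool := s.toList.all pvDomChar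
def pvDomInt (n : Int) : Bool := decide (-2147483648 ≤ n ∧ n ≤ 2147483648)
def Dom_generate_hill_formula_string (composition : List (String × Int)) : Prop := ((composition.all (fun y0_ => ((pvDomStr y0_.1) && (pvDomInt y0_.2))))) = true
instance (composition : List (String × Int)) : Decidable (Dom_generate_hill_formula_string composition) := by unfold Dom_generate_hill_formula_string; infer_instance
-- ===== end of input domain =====

-- B replaces A's two special-case C/H pops plus a separate sorted loop by one sort of the
-- positive entries under a Hill-order key followed by a single join (objective: simpler).

-- ===== PORT A =====
def generate_hill_formula_string (composition : List (String × Int)) : String :=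
  let d := PySem.Dict.ofList composition
  if d.items.isEmpty then ""
  else
    let comp := PySem.Dict.mk (d.items.filter (fun kv => decide (kv.2 > 0)))
    let formula0 : String := ""
    -- if 'C' in comp: count = comp.pop('C'); formula_str += f"C{count if count > 1 else ''}"
    let s1 : String × PySem.Dict String Int :=
      if comp.contains "C" then
        match comp.pop? "C" with
        | some (count, rest) =>
            (formula0 ++ "C" ++ (if count > 1 then PySem.Int.toStr count else ""), rest)
        | none => (formula0, comp)
      else (formula0, comp)
    -- if 'H' in comp: count = comp.pop('H'); formula_str += f"H{count if count > 1 else ''}"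
    let s2 : String × PySem.Dict String Int :=
      if s1.2.contains "H" then
        match s1.2.pop? "H" with
        | some (count, rest) =>
            (s1.1 ++ "H" ++ (if count > 1 then PySem.Int.toStr count else ""), rest)
        | none => (s1.1, s1.2)
      else (s1.1, s1.2)
    -- for element in sorted(comp.keys()): formula_str += f"{element}{count if count > 1 else ''}"
    (PySem.List.sorted s2.2.keys (fun k => k)).foldl
      (fun acc element =>
        acc ++ element ++ (if s2.2.getD element 0 > 1 then PySem.Int.toStr (s2.2.getD element 0) else ""))
      s2.1

-- ===== PORT B =====
def hillKey (item : String × Int) : String :=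
  if item.1 = "C" then "0"
  else if item.1 = "H" then "1"
  else "2" ++ item.1

def generate_hill_formula_string_alt (composition : List (String × Int)) : String :=
  let positive := (PySem.Dict.ofList composition).items.filter (fun item => decide (item.2 > 0))
  PySem.Str.join ""
    ((PySem.List.sorted positive hillKey).map
      (fun p => p.1 ++ (if p.2 > 1 then PySem.Int.toStr p.2 else "")))

-- ===== PRECONDITION & SPEC =====
def Spec_generate_hill_formula_string (composition : List (String × Int)) (out : String) : Prop := out = generate_hill_formula_string_alt composition
instance (composition : List (String × Int)) (out : String) : Decidable (Spec_generate_hill_formula_string composition out) := by unfold Spec_generate_hill_formula_string; infer_instance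

-- ===== CLAIM (what is proved, stated in full; the proofs are below) =====
def Claim_equal_generate_hill_formula_string : Prop := ∀ (composition : List (String × Int)), Dom_generate_hill_formula_string composition → Spec_generate_hill_formula_string composition (generate_hill_formula_string composition)

-- ===== LEMMAS AND PROOFS =====

def pvRender (p : String × Int) : String := p.1 ++ (if p.2 > 1 then PySem.Int.toStr p.2 else "")

theorem pvIntercalate_nil (l : List (List Char)) : List.intercalate [] l = l.flatten := by
  induction l with
  | nil => rfl
  | cons x xs ih =>
    cases xs with
    | nil => simp [List.intercalate]
    | cons y ys => simp_all [List.intercalate, List.intersperse]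

theorem pvJoin_nil : PySem.Str.join "" [] = "" := rfl

theorem pvJoin_cons (x : String) (xs : List String) :
    PySem.Str.join "" (x :: xs) = x ++ PySem.Str.join "" xs := by
  simp [PySem.Str.join, PySem.Chars.join, pvIntercalate_nil, String.ofList_append, String.ofList_toList]

theorem pvJoin_append (xs ys : List String) :
    PySem.Str.join "" (xs ++ ys) = PySem.Str.join "" xs ++ PySem.Str.join "" ys := by
  induction xs with
  | nil => simp [pvJoin_nil]
  | cons x xs ih => simp [pvJoin_cons, ih, String.append_assoc]

theorem pvFoldl_join {α : Type} (f : α → String) (rs : List α) (init : String) :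
    rs.foldl (fun acc p => acc ++ f p) init = init ++ PySem.Str.join "" (rs.map f) := by
  induction rs generalizing init with
  | nil => simp [pvJoin_nil]
  | cons x xs ih => simp [ih, pvJoin_cons, String.append_assoc]

theorem pvFilter_get? (l : List (String × Int)) (k : String) (h : (l.map Prod.fst).Nodup) :
    l.filter (fun p => p.1 == k) = ((PySem.Dict.mk l).get? k).elim [] (fun v => [(k, v)]) := by
  induction l with
  | nil => rfl
  | cons p t ih =>
    simp only [List.map_cons, List.nodup_cons] at h
    rw [List.filter_cons, PySem.Dict.get?_mk_cons]
    by_cases hk : p.1 = k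
    · subst hk
      simp only [beq_self_eq_true, if_pos, Option.elim]
      have hnil : t.filter (fun q => q.1 == p.1) = [] := by
        apply List.filter_eq_nil_iff.mpr
        intro q hq hbe
        have hm : q.1 ∈ List.map Prod.fst t := List.mem_map_of_mem hq
        rw [eq_of_beq hbe] at hm
        exact h.1 hm
      simp [hnil]
    · have hb : (p.1 == k) = false := beq_eq_false_iff_ne.mpr hk
      simp only [hb, Bool.false_eq_true, ite_false]
      exact ih h.2

theorem pvLt01 : ("0" : String) < "1" := by
  rw [String.lt_iff_toList_lt]
  exact List.Lex.rel (by decide)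
theorem pvLt0 (x : String) : ("0" : String) < "2" ++ x := by
  rw [String.lt_iff_toList_lt, String.toList_append]
  exact List.Lex.rel (by decide)
theorem pvLt1 (x : String) : ("1" : String) < "2" ++ x := by
  rw [String.lt_iff_toList_lt, String.toList_append]
  exact List.Lex.rel (by decide)
theorem pvLt2 (a b : String) (h : a < b) : ("2" ++ a : String) < "2" ++ b := by
  rw [String.lt_iff_toList_lt, String.toList_append, String.toList_append]
  exact List.Lex.cons (String.lt_iff_toList_lt.mp h)

theorem pvPairwise_filter_single (l : List (String × Int)) (k : String)
    (h : (l.map Prod.fst).Nodup) (R : (String × Int) → (String × Int) → Prop) :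
    List.Pairwise R (l.filter (fun p => p.1 == k)) := by
  rw [pvFilter_get? l k h]
  cases (PySem.Dict.mk l).get? k <;> simp

theorem pvFilter_fst_nodup (l : List (String × Int)) (q : (String × Int) → Bool)
    (h : (l.map Prod.fst).Nodup) : ((l.filter q).map Prod.fst).Nodup :=
  ((List.filter_sublist.map Prod.fst).nodup h : _)

theorem pvSorted_fst_pairwise_lt (r : List (String × Int)) (h : (r.map Prod.fst).Nodup) :
    List.Pairwise (fun a b => a.1 < b.1) (PySem.List.sorted r (fun p => p.1)) := by
  have hle := PySem.List.sorted_pairwise r (fun p => p.1)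
  have hperm : ((PySem.List.sorted r (fun p => p.1)).map Prod.fst).Perm (r.map Prod.fst) :=
    (PySem.List.sorted_perm r (fun p => p.1) false).map Prod.fst
  have hne : List.Pairwise (fun a b : String × Int => a.1 ≠ b.1)
      (PySem.List.sorted r (fun p => p.1)) :=
    List.pairwise_map.mp (hperm.nodup_iff.mpr h)
  exact (hle.and hne).imp (fun hab => lt_of_le_of_ne hab.1 hab.2)

theorem pvSorted_keys (r : List (String × Int)) (h : (r.map Prod.fst).Nodup) :
    PySem.List.sorted (r.map Prod.fst) (fun k => k) =
      (PySem.List.sorted r (fun p => p.1)).map Prod.fst := by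
  apply PySem.List.sorted_eq_of_perm_of_pairwise_lt
  · exact (PySem.List.sorted_perm r (fun p => p.1) false).map Prod.fst
  · exact List.pairwise_map.mpr (pvSorted_fst_pairwise_lt r h)

theorem pvSorted_decomp (l : List (String × Int)) (h : (l.map Prod.fst).Nodup) :
    PySem.List.sorted l hillKey =
      l.filter (fun p => p.1 == "C") ++ l.filter (fun p => p.1 == "H") ++
        PySem.List.sorted (l.filter (fun p => !(p.1 == "C") && !(p.1 == "H"))) (fun p => p.1) := by
  have hfh : (l.filter (fun p => !(p.1 == "C"))).filter (fun p => p.1 == "H")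
      = l.filter (fun p => p.1 == "H") := by
    rw [List.filter_filter]
    apply List.filter_congr
    intro p _
    by_cases hp : p.1 = "H" <;> simp [hp]
  have hfr : (l.filter (fun p => !(p.1 == "C"))).filter (fun p => !(p.1 == "H"))
      = l.filter (fun p => !(p.1 == "C") && !(p.1 == "H")) := by
    rw [List.filter_filter]
    apply List.filter_congr
    intro p _; rw [Bool.and_comm]
  apply PySem.List.sorted_eq_of_perm_of_pairwise_lt
  · have h2 : (l.filter (fun p => p.1 == "H") ++
        l.filter (fun p => !(p.1 == "C") && !(p.1 == "H"))).Perm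
        (l.filter (fun p => !(p.1 == "C"))) := by
      rw [← hfh, ← hfr]; exact List.filter_append_perm _ _
    rw [List.append_assoc]
    refine List.Perm.trans ?_ (List.filter_append_perm (fun p => p.1 == "C") l)
    refine List.Perm.append_left _ (List.Perm.trans ?_ h2)
    exact List.Perm.append_left _ (PySem.List.sorted_perm _ _ _)
  · rw [List.pairwise_append, List.pairwise_append]
    have hmemC : ∀ x ∈ l.filter (fun p => p.1 == "C"), hillKey x = "0" := by
      intro x hx
      have := (List.mem_filter.mp hx).2
      simp only [beq_iff_eq] at this
      simp [hillKey, this]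
    have hmemH : ∀ x ∈ l.filter (fun p => p.1 == "H"), hillKey x = "1" := by
      intro x hx
      have := (List.mem_filter.mp hx).2
      simp only [beq_iff_eq] at this
      simp [hillKey, this]
    have hmemR : ∀ x ∈ PySem.List.sorted (l.filter (fun p => !(p.1 == "C") && !(p.1 == "H")))
        (fun p => p.1), hillKey x = "2" ++ x.1 := by
      intro x hx
      rw [PySem.List.mem_sorted] at hx
      have := (List.mem_filter.mp hx).2
      simp only [Bool.and_eq_true, Bool.not_eq_true', beq_eq_false_iff_ne] at this
      simp [hillKey, this.1, this.2]
    refine ⟨⟨pvPairwise_filter_single l "C" h _, pvPairwise_filter_single l "H" h _, ?_⟩, ?_, ?_⟩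
    · intro x hx y hy
      rw [hmemC x hx, hmemH y hy]; exact pvLt01
    · have hnodupR := pvFilter_fst_nodup l (fun p => !(p.1 == "C") && !(p.1 == "H")) h
      exact (pvSorted_fst_pairwise_lt _ hnodupR).imp_of_mem (fun {a b} ha hb hab => by
        rw [hmemR a ha, hmemR b hb]; exact pvLt2 _ _ hab)
    · intro x hx y hy
      rw [hmemR y hy]
      rcases List.mem_append.mp hx with hx | hx
      · rw [hmemC x hx]; exact pvLt0 _
      · rw [hmemH x hx]; exact pvLt1 _

theorem pvPop_step (l : List (String × Int)) (k : String) (pre : String)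
    (h : (l.map Prod.fst).Nodup) :
    (if (PySem.Dict.mk l).contains k then
      match (PySem.Dict.mk l).pop? k with
      | some (count, rest) =>
          (pre ++ k ++ (if count > 1 then PySem.Int.toStr count else ""), rest)
      | none => (pre, PySem.Dict.mk l)
    else (pre, PySem.Dict.mk l))
    = (pre ++ PySem.Str.join "" ((l.filter (fun p => p.1 == k)).map pvRender),
       PySem.Dict.mk (l.filter (fun p => !(p.1 == k)))) := by
  have hfg := pvFilter_get? l k h
  rw [PySem.Dict.contains_eq_isSome_get?]
  cases hg : (PySem.Dict.mk l).get? k with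
  | none =>
    rw [hg] at hfg
    have hself : l.filter (fun p => !(p.1 == k)) = l := by
      apply List.filter_eq_self.mpr
      intro p hp
      have : ¬ k ∈ (PySem.Dict.mk l).keys := (PySem.Dict.get?_eq_none_iff_not_mem_keys _ _).mp hg
      rw [PySem.Dict.keys_mk] at this
      have hne : p.1 ≠ k := fun he => this (he ▸ List.mem_map_of_mem hp)
      simp [hne]
    simp [hfg, hself, pvJoin_nil]
  | some v =>
    rw [hg] at hfg
    simp only [Option.isSome_some, if_pos, PySem.Dict.pop?, hg, Option.map_some]
    have herase : (PySem.Dict.mk l).erase k = PySem.Dict.mk (l.filter (fun p => !(p.1 == k))) := rfl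
    rw [herase, hfg]
    simp [pvJoin_cons, pvJoin_nil, pvRender, String.append_assoc]

theorem pvFold_step (r : List (String × Int)) (init : String)
    (h : (r.map Prod.fst).Nodup) :
    (PySem.List.sorted (PySem.Dict.mk r).keys (fun k => k)).foldl
      (fun acc element =>
        acc ++ element ++
          (if (PySem.Dict.mk r).getD element 0 > 1
           then PySem.Int.toStr ((PySem.Dict.mk r).getD element 0) else "")) init
    = init ++ PySem.Str.join "" ((PySem.List.sorted r (fun p => p.1)).map pvRender) := by
  rw [PySem.Dict.keys_mk, pvSorted_keys r h, List.foldl_map]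
  rw [PySem.List.foldl_congr_mem _ _ (fun acc p => acc ++ pvRender p) init ?_]
  · exact pvFoldl_join pvRender _ init
  · intro acc x hx
    rw [PySem.List.mem_sorted] at hx
    have hget : (PySem.Dict.mk r).getD x.1 0 = x.2 := by
      apply PySem.Dict.getD_of_mem_items
      · exact hx
      · rw [PySem.Dict.keys_mk]; exact h
    rw [hget]; simp [pvRender, String.append_assoc]

theorem pvCore (l : List (String × Int)) (hnd : (l.map Prod.fst).Nodup) :
    (let comp := PySem.Dict.mk l
     let formula0 : String := ""
     let s1 : String × PySem.Dict String Int :=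
       if comp.contains "C" then
         match comp.pop? "C" with
         | some (count, rest) =>
             (formula0 ++ "C" ++ (if count > 1 then PySem.Int.toStr count else ""), rest)
         | none => (formula0, comp)
       else (formula0, comp)
     let s2 : String × PySem.Dict String Int :=
       if s1.2.contains "H" then
         match s1.2.pop? "H" with
         | some (count, rest) =>
             (s1.1 ++ "H" ++ (if count > 1 then PySem.Int.toStr count else ""), rest)
         | none => (s1.1, s1.2)
       else (s1.1, s1.2)
     (PySem.List.sorted s2.2.keys (fun k => k)).foldl
       (fun acc element =>
         acc ++ element ++ (if s2.2.getD element 0 > 1 then PySem.Int.toStr (s2.2.getD element 0) else ""))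
       s2.1)
    = PySem.Str.join "" ((PySem.List.sorted l hillKey).map pvRender) := by
  have h1 := pvPop_step l "C" "" hnd
  have hnd1 : ((l.filter (fun p => !(p.1 == "C"))).map Prod.fst).Nodup :=
    pvFilter_fst_nodup l _ hnd
  have h2 := pvPop_step (l.filter (fun p => !(p.1 == "C"))) "H"
    ("" ++ PySem.Str.join "" ((l.filter (fun p => p.1 == "C")).map pvRender)) hnd1
  have hfh : (l.filter (fun p => !(p.1 == "C"))).filter (fun p => p.1 == "H")
      = l.filter (fun p => p.1 == "H") := by
    rw [List.filter_filter]
    apply List.filter_congr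
    intro p _
    by_cases hp : p.1 = "H" <;> simp [hp]
  have hfr : (l.filter (fun p => !(p.1 == "C"))).filter (fun p => !(p.1 == "H"))
      = l.filter (fun p => !(p.1 == "C") && !(p.1 == "H")) := by
    rw [List.filter_filter]
    apply List.filter_congr
    intro p _; rw [Bool.and_comm]
  have hndr : ((l.filter (fun p => !(p.1 == "C") && !(p.1 == "H"))).map Prod.fst).Nodup :=
    pvFilter_fst_nodup l _ hnd
  show (PySem.List.sorted _ _).foldl _ _ = _
  rw [h1, h2, hfh, hfr]
  rw [pvFold_step _ _ hndr]
  rw [pvSorted_decomp l hnd]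
  simp [List.map_append, pvJoin_append, String.append_assoc]


-- ===== VERDICT (by name: the statement is the Claim_ definition above) =====
theorem generate_hill_formula_string_spec : Claim_equal_generate_hill_formula_string := by
  intro composition _
  show generate_hill_formula_string composition = generate_hill_formula_string_alt composition
  unfold generate_hill_formula_string generate_hill_formula_string_alt
  have hkeys : (((PySem.Dict.ofList composition).items.map Prod.fst)).Nodup := by
    have := PySem.Dict.nodup_keys_ofList composition
    simpa [PySem.Dict.keys] using this
  have hnd : ((((PySem.Dict.ofList composition).items.filter
      (fun kv => decide (kv.2 > 0))).map Prod.fst)).Nodup :=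
    pvFilter_fst_nodup _ _ hkeys
  by_cases he : (PySem.Dict.ofList composition).items.isEmpty
  · have hnil : (PySem.Dict.ofList composition).items = [] := List.isEmpty_iff.mp he
    have hs : PySem.List.sorted ([] : List (String × Int)) hillKey false = [] := rfl
    simp [hnil, hs, pvJoin_nil]
  · simp only [he, Bool.false_eq_true, ite_false]
    exact pvCore _ hnd
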